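-- pv_equiv track=rewrite | github.com/EthanHolleman/TARP | Transposer/backmap.py | make_flank_dict
-- ===== SOURCE A (Python) =====
-- def make_flank_dict(zipped_els):
--     '''
--     Returns a dictionary where keys are concat strings of left and flanking
--     sequences and values are any elements that have those exact flanks. This
--     is done in the case two elements do have same flanks since this is possible
--     but highly unlikely. The flank_dict can then be used to find exact matches
--     to flanking sequences from the outdated elements.
--     '''
--     flank_dict = {}
--     for f, el in zipped_els:
--         l, r = f  # unpack flank tuple
--         f = l + r  # make string of both flanks to use as key for exact matches
--         if f in flank_dict:
--             flank_dict[f].append(el)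
--         else:
--             flank_dict[f] = [el]
--
--     return flank_dict
-- ===== SOURCE B (Python) =====
-- def make_flank_dict(zipped_els):
--     # Two-pass grouping: compute (key, element) pairs, collect distinct keys in
--     # first-occurrence order, then gather each key's elements by a scan.
--     pairs = [(f[0] + f[1], el) for f, el in zipped_els]
--     keys = []
--     for k, _ in pairs:
--         if k not in keys:
--             keys.append(k)
--     return {k: [el for k2, el in pairs if k2 == k] for k in keys}
-- ===== Notes on version B (the rewrite author's own statement) =====
-- stated objective: alternative
-- what changed: Replaces the single-pass hash-dict append loop by a two-pass grouping: first collect the distinct keys in first-occurrence order, then build each group's element list with a filtering scan over the precomputed (key, element) pairs.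
import Mathlib
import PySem

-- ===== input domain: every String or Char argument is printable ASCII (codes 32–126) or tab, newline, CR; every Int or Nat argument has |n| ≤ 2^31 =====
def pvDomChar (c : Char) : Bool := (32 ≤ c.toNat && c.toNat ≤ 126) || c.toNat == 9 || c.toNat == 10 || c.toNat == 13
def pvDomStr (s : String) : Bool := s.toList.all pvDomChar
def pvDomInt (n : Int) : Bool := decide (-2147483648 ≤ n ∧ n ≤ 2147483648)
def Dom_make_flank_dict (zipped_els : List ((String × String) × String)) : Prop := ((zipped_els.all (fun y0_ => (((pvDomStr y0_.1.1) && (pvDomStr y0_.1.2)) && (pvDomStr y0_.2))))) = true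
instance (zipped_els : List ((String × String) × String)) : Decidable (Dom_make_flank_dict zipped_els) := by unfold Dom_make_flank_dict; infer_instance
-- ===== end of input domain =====

-- B replaces A's one-pass dict-append loop by a two-pass grouping (distinct keys in
-- first-occurrence order, then a per-key filtering scan); same return value, no speed claim.

-- ===== PORT A =====
-- for f, el in zipped_els: f = f[0] + f[1]; append to flank_dict[f] or start a new [el]
def make_flank_dict (zipped_els : List ((String × String) × String)) : List (String × List String) :=
  (zipped_els.foldl
    (fun flank_dict fe =>
      if flank_dict.contains (fe.1.1 ++ fe.1.2) then
        flank_dict.modify (fe.1.1 ++ fe.1.2) [] (fun v => v ++ [fe.2])   -- flank_dict[f].append(el)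
      else
        flank_dict.insert (fe.1.1 ++ fe.1.2) [fe.2])                     -- flank_dict[f] = [el]
    PySem.Dict.empty).items

-- ===== PORT B =====
def make_flank_dict_alt (zipped_els : List ((String × String) × String)) : List (String × List String) :=
  let pairs := zipped_els.map (fun fe => (fe.1.1 ++ fe.1.2, fe.2))
  let keys := pairs.foldl (fun ks p => if p.1 ∈ ks then ks else ks ++ [p.1]) []
  -- dict comprehension {k: [el for k2, el in pairs if k2 == k] for k in keys}
  (keys.foldl
    (fun d k => d.insert k ((pairs.filter (fun p => p.1 == k)).map (·.2)))
    PySem.Dict.empty).items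

-- ===== PRECONDITION & SPEC =====
def Spec_make_flank_dict (zipped_els : List ((String × String) × String)) (out : List (String × List String)) : Prop := out = make_flank_dict_alt zipped_els
instance (zipped_els : List ((String × String) × String)) (out : List (String × List String)) : Decidable (Spec_make_flank_dict zipped_els out) := by unfold Spec_make_flank_dict; infer_instance

-- ===== CLAIM (what is proved, stated in full; the proofs are below) =====
def Claim_equal_make_flank_dict : Prop := ∀ (zipped_els : List ((String × String) × String)), Dom_make_flank_dict zipped_els → Spec_make_flank_dict zipped_els (make_flank_dict zipped_els)

-- ===== LEMMAS AND PROOFS =====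

-- A's conditional append/insert step is exactly Dict.modify with default [].
lemma step_eq_modify (d : PySem.Dict String (List String)) (k : String) (el : String) :
    (if d.contains k then d.modify k [] (fun v => v ++ [el]) else d.insert k [el])
      = d.modify k [] (fun v => v ++ [el]) := by
  by_cases h : d.contains k
  · simp [h]
  · simp only [Bool.not_eq_true] at h
    simp [h, PySem.Dict.modify, PySem.Dict.getD_of_not_contains d _ h]

-- A Nodup-keyed dict's items are its keys paired with their getD values.
lemma items_eq_keys_map_getD (d : PySem.Dict String (List String))
    (h : d.keys.Nodup) : d.items = d.keys.map (fun k => (k, d.getD k [])) := by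
  obtain ⟨l⟩ := d
  induction l with
  | nil => rfl
  | cons p rest ih =>
    obtain ⟨k0, v0⟩ := p
    simp only [PySem.Dict.keys, List.map_cons, List.nodup_cons] at h ih ⊢
    congr 1
    · simp [PySem.Dict.getD, PySem.Dict.get?_mk_cons]
    · rw [List.map_congr_left (g := fun k => (k, PySem.Dict.getD ⟨rest⟩ k []))]
      · exact ih h.2
      · intro k hk
        have hne : (k0 == k) = false := by
          simp only [beq_eq_false_iff_ne]
          rintro rfl; exact h.1 hk
        simp [PySem.Dict.getD, PySem.Dict.get?_mk_cons, hne]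

theorem make_flank_dict_eq_alt (z : List ((String × String) × String)) :
    make_flank_dict z = make_flank_dict_alt z := by
  set pairs : List (String × String) := z.map (fun fe => (fe.1.1 ++ fe.1.2, fe.2)) with hp
  -- A as a modify-fold over pairs
  have hA : make_flank_dict z
      = (pairs.foldl (fun d p => d.modify p.1 [] (fun v => v ++ [p.2])) PySem.Dict.empty).items := by
    unfold make_flank_dict
    rw [hp, List.foldl_map]
    refine congrArg PySem.Dict.items (List.foldl_ext _ _ _ ?_)
    intro d fe _
    exact step_eq_modify d (fe.1.1 ++ fe.1.2) fe.2
  -- B's key list is Set.ofList of the key projection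
  have hK : pairs.foldl (fun ks p => if p.1 ∈ ks then ks else ks ++ [p.1]) ([] : List String)
      = PySem.Set.ofList (pairs.map (·.1)) := by
    rw [← PySem.Set.update_nil_left, PySem.Set.update_map_eq_foldl_add]
    refine (List.foldl_ext _ _ _ ?_).symm
    intro s p _
    exact PySem.Set.add_eq_ite s p.1
  have hKnodup : (PySem.Set.ofList (pairs.map (·.1))).Nodup := PySem.Set.nodup_ofList _
  -- B evaluates to the map over the distinct keys
  have hB : make_flank_dict_alt z
      = (PySem.Set.ofList (pairs.map (·.1))).map
          (fun k => (k, (pairs.filter (fun p => p.1 == k)).map (·.2))) := by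
    unfold make_flank_dict_alt
    simp only [← hp, hK]
    rw [PySem.Dict.items_foldl_insert_fresh _ (fun k => k) _ PySem.Dict.empty
        (fun a _ => PySem.Dict.contains_empty a) (by simpa using hKnodup)]
    simp [PySem.Dict.empty]
  -- A's dict: keys and per-key values
  have hkeys : (pairs.foldl (fun d p => d.modify p.1 [] (fun v => v ++ [p.2])) PySem.Dict.empty).keys
      = PySem.Set.ofList (pairs.map (·.1)) := by
    have := PySem.Dict.keys_foldl_modify_key pairs (fun p => p.1) ([] : List String)
      (fun _ p => fun v => v ++ [p.2]) PySem.Dict.empty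
    simp only [PySem.Dict.keys_empty, PySem.Set.update_nil_left] at this
    exact this
  have hnodup : (pairs.foldl (fun d p => d.modify p.1 [] (fun v => v ++ [p.2])) PySem.Dict.empty).keys.Nodup := by
    rw [hkeys]; exact hKnodup
  rw [hA, items_eq_keys_map_getD _ hnodup, hkeys, hB]
  refine List.map_congr_left ?_
  intro k _
  rw [PySem.Dict.getD_foldl_modify_append]
  simp [PySem.Dict.getD_empty]

-- ===== VERDICT (by name: the statement is the Claim_ definition above) =====
theorem make_flank_dict_spec : Claim_equal_make_flank_dict := by
  intro z _
  exact make_flank_dict_eq_alt z
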